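-- pv_equiv track=rewrite | github.com/parmer110/tables | common/apps.py | dec_from_62
-- ===== SOURCE A (Python) =====
-- def dec_from_62(hash):
--     # Assert len(hash) != 4, "Input string should be 4 characters length represents a plain digit"
--     hash = str(hash)[:: -1]
--     result = 0
--     for i in range(0, 4):
--         digit = hash[i: i + 1]
--         if digit < 'A':
--             result += (ord(digit) - 48) * 62 ** i
--         elif digit < 'a':
--             result += (ord(digit) - 55) * 62 ** i
--         else:
--             result += (ord(digit) - 61) * 62 ** i
--     return result
-- ===== SOURCE B (Python) =====
-- def dec_from_62(hash):
--     # Horner's method over the last 4 characters, forward order (no power table).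
--     s = str(hash)
--     result = 0
--     for digit in s[-4:]:
--         if digit < 'A':
--             v = ord(digit) - 48
--         elif digit < 'a':
--             v = ord(digit) - 55
--         else:
--             v = ord(digit) - 61
--         result = result * 62 + v
--     return result
-- ===== Notes on version B (the rewrite author's own statement) =====
-- stated objective: simpler
-- what changed: Replaces the reversed-string slice loop with an explicit 62**i power table by a single forward Horner multiply-accumulate pass over the last four characters.
import Mathlib
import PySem

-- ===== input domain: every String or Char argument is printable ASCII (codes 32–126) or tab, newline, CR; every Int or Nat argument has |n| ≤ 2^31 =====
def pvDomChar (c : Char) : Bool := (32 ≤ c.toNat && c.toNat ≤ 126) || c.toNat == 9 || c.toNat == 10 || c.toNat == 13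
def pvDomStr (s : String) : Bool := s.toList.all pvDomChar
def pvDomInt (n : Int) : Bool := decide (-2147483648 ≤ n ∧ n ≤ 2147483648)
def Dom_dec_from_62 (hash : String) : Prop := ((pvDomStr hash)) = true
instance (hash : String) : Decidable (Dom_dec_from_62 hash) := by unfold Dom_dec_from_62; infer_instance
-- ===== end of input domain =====

-- B replaces A's reversed-string slice loop with the 62**i power table by one forward
-- Horner multiply-accumulate pass over the last four characters (objective: simpler).

-- ===== PORT A =====
def dec_from_62 (hash : String) : Int :=
  -- hash = str(hash)[::-1]  (PySem.List.slice? xs none none (-1) = some xs.reverse)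
  let h : List Char := hash.toList.reverse
  -- for i in range(0, 4): digit = hash[i:i+1]; branch on digit < 'A' / < 'a'
  (PySem.List.pyRange 0 4 1).foldl (fun result i =>
    let digit := PySem.List.slice h (some i) (some (i + 1))
    match digit with
    | [c] =>
      if c < 'A' then result + ((c.toNat : Int) - 48) * 62 ^ i.toNat
      else if c < 'a' then result + ((c.toNat : Int) - 55) * 62 ^ i.toNat
      else result + ((c.toNat : Int) - 61) * 62 ^ i.toNat
    | _ => result  -- ord('') raises TypeError in Python: excluded by Pre_
    ) 0

-- ===== PORT B =====
def dec_from_62_alt (hash : String) : Int :=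
  -- for digit in s[-4:]: result = result * 62 + v
  (PySem.List.slice hash.toList (some (-4)) none).foldl (fun result c =>
    let v : Int :=
      if c < 'A' then (c.toNat : Int) - 48
      else if c < 'a' then (c.toNat : Int) - 55
      else (c.toNat : Int) - 61
    result * 62 + v) 0

-- ===== PRECONDITION & SPEC =====
-- A raises TypeError (ord of an empty slice) on strings shorter than 4 characters.
def Pre_dec_from_62 (hash : String) : Prop := 4 ≤ hash.toList.length
instance (hash : String) : Decidable (Pre_dec_from_62 hash) := by unfold Pre_dec_from_62; infer_instance
def pvWitness_dec_from_62 : String := "0a9Z"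

def Spec_dec_from_62 (hash : String) (out : Int) : Prop := out = dec_from_62_alt hash
instance (hash : String) (out : Int) : Decidable (Spec_dec_from_62 hash out) := by unfold Spec_dec_from_62; infer_instance

-- ===== CLAIM (what is proved, stated in full; the proofs are below) =====
def Claim_equal_dec_from_62 : Prop := ∀ (hash : String), Dom_dec_from_62 hash → Pre_dec_from_62 hash → Spec_dec_from_62 hash (dec_from_62 hash)

-- ===== LEMMAS AND PROOFS =====

-- ===== VERDICT (by name: the statement is the Claim_ definition above) =====
set_option maxHeartbeats 1000000 in
theorem dec_from_62_spec : Claim_equal_dec_from_62 := by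
  intro hash _ hpre
  unfold Spec_dec_from_62 dec_from_62 dec_from_62_alt
  have hlen : 4 ≤ hash.toList.length := hpre
  rcases hrev : hash.toList.reverse with _ | ⟨a, _ | ⟨b, _ | ⟨c, _ | ⟨d, t⟩⟩⟩⟩ <;>
    try (exfalso; have h0 := congrArg List.length hrev; rw [List.length_reverse] at h0; simp only [List.length_cons, List.length_nil] at h0; omega)
  have hl : hash.toList = (a :: b :: c :: d :: t).reverse := by
    rw [← hrev, List.reverse_reverse]
  rw [hl]
  rw [PySem.List.slice_from_neg_ofNat _ 4 (by norm_num)]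
  have hdrop : ((a :: b :: c :: d :: t).reverse).drop ((a :: b :: c :: d :: t).reverse.length - 4) = [d, c, b, a] := by
    simp [List.reverse_cons]
  rw [hdrop]
  have hR : PySem.List.pyRange 0 4 1 = [0, 1, 2, 3] := by decide
  rw [hR]
  simp only [List.foldl]
  simp [pysem]
  split_ifs <;> ring
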